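-- pv_equiv track=rewrite | github.com/Rancho2002/CodeMania | interviewbit/StringAndItsFrequency.py | solve
-- ===== SOURCE A (Python) =====
-- def solve(A):
--     d={}
--     for i in A:
--         if i in d:
--             d[i]+=1
--         else:
--             d[i]=1
--
--     ans=""
--
--     for i in d:
--         ans= ans+ i+ str(d[i])
--
--
--     return ans
-- ===== SOURCE B (Python) =====
-- def solve(A):
--     if not A:
--         return ""
--     c = A[0]
--     rest = "".join(ch for ch in A if ch != c)
--     return c + str(len(A) - len(rest)) + solve(rest)
-- ===== Notes on version B (the rewrite author's own statement) =====
-- stated objective: alternative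
-- what changed: Replaces A's two-pass dict-counting loop with a divide-and-filter recursion: take the first character, compute its count as the length drop after filtering all its occurrences out, emit it, and recurse on the filtered remainder.
import Mathlib
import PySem

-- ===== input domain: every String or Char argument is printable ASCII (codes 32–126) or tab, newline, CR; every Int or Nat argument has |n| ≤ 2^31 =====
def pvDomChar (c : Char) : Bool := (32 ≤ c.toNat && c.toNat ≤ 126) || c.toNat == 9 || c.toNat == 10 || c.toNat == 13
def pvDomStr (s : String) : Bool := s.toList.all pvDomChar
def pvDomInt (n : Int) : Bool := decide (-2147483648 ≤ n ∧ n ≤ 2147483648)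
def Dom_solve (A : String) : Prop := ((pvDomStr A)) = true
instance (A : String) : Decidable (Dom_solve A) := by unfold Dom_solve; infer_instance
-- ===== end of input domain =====

-- B replaces A's dict-counting two-pass loop with a divide-and-filter recursion: emit the first
-- character with its count (the length drop after filtering it out), recurse on the remainder
-- (objective: alternative decomposition, same results).

-- ===== PORT A =====
def solve (A : String) : String :=
  let d := A.toList.foldl
    (fun (d : PySem.Dict Char Int) c =>
      if d.contains c then d.insert c (d.getD c 0 + 1) else d.insert c 1)
    PySem.Dict.empty
  d.items.foldl (fun ans p => ans ++ String.singleton p.1 ++ PySem.Int.toStr p.2) ""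

-- ===== PORT B =====
-- ''.join(ch for ch in A if ch != c) is ported as List.filter; len(A) - len(rest) as Int subtraction.
def solveAltGo : List Char → String
  | [] => ""
  | c :: t =>
    let rest := (c :: t).filter (fun x => x ≠ c)
    String.singleton c ++ PySem.Int.toStr (((c :: t).length : Int) - (rest.length : Int))
      ++ solveAltGo rest
termination_by l => l.length
decreasing_by
  simp only [List.filter_cons]
  have h := List.length_filter_le (fun x => decide (x ≠ c)) t
  simp_all

def solve_alt (A : String) : String := solveAltGo A.toList

-- ===== PRECONDITION & SPEC =====
def Spec_solve (A : String) (out : String) : Prop := out = solve_alt A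
instance (A : String) (out : String) : Decidable (Spec_solve A out) := by unfold Spec_solve; infer_instance

-- ===== CLAIM (what is proved, stated in full; the proofs are below) =====
def Claim_equal_solve : Prop := ∀ (A : String), Dom_solve A → Spec_solve A (solve A)

-- ===== LEMMAS AND PROOFS =====

def emitStep (ans : String) (p : Char × Int) : String :=
  ans ++ String.singleton p.1 ++ PySem.Int.toStr p.2

-- A's output, characterised: the distinct characters in first-occurrence order, each with its count.
def outOf (l : List Char) : String :=
  ((PySem.Set.ofList l).map (fun k => (k, (l.count k : Int)))).foldl emitStep ""

theorem solveAltGo_nil : solveAltGo [] = "" := by rw [solveAltGo]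

theorem solveAltGo_cons (c : Char) (t : List Char) :
    solveAltGo (c :: t)
      = String.singleton c
          ++ PySem.Int.toStr (((c :: t).length : Int)
              - (((c :: t).filter (fun x => x ≠ c)).length : Int))
          ++ solveAltGo ((c :: t).filter (fun x => x ≠ c)) := by
  rw [solveAltGo]

theorem stepA_eq :
    (fun (d : PySem.Dict Char Int) c =>
      if d.contains c then d.insert c (d.getD c 0 + 1) else d.insert c 1)
    = (fun (d : PySem.Dict Char Int) c => d.insert c (d.getD c 0 + 1)) := by
  funext d c
  by_cases h : d.contains c = true
  · simp [h]
  · have h' : d.contains c = false := by simpa using h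
    simp [h, PySem.Dict.getD_of_not_contains d 0 h']

theorem solve_eq_outOf (A : String) : solve A = outOf A.toList := by
  unfold solve outOf emitStep
  simp only [stepA_eq, PySem.Dict.foldl_insert_getD_add_one_eq_counter, PySem.Dict.items_counter]

theorem foldl_emit_init : ∀ (ds : List (Char × Int)) (s : String),
    ds.foldl emitStep s = s ++ ds.foldl emitStep "" := by
  intro ds
  induction ds with
  | nil => intro s; simp [List.foldl]
  | cons p t ih =>
    intro s
    rw [List.foldl_cons, List.foldl_cons, ih (emitStep s p), ih (emitStep "" p)]
    simp only [emitStep, String.empty_append, String.append_assoc]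

theorem lenSplit (c : Char) (t : List Char) :
    (t.filter (fun x => decide (x ≠ c))).length + t.count c = t.length := by
  induction t with
  | nil => simp
  | cons x r ih =>
    by_cases hx : x = c
    · subst hx
      rw [List.filter_cons_of_neg (by simp), List.count_cons_self, List.length_cons]
      omega
    · rw [List.filter_cons_of_pos (by simp [hx])]
      have hbeq : (x == c) = false := by simp [hx]
      simp only [List.count_cons, hbeq, List.length_cons, Bool.false_eq_true, if_false]
      omega

-- ordered dedup commutes with filter
theorem ofListFilter (p : Char → Bool) : ∀ t : List Char,
    PySem.Set.ofList (t.filter p) = (PySem.Set.ofList t).filter p := by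
  intro t
  induction t with
  | nil => simp [PySem.Set.ofList_nil]
  | cons x r ih =>
    by_cases hp : p x = true
    · rw [List.filter_cons_of_pos hp, PySem.Set.ofList_cons, PySem.Set.ofList_cons,
        List.filter_cons_of_pos hp]
      simp only [PySem.Set.discard, ih, List.filter_filter]
      exact congrArg _ (List.filter_congr (fun y _ => by rw [Bool.and_comm]))
    · rw [List.filter_cons_of_neg hp, PySem.Set.ofList_cons, List.filter_cons_of_neg hp, ih]
      simp only [PySem.Set.discard, List.filter_filter]
      refine (List.filter_congr (fun y _ => ?_)).symm
      by_cases hy : y = x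
      · subst hy; simp [hp]
      · simp [hy]

theorem ofList_cons_filter (c : Char) (t : List Char) :
    PySem.Set.ofList (c :: t) = c :: PySem.Set.ofList (t.filter (fun x => decide (x ≠ c))) := by
  rw [PySem.Set.ofList_cons]
  congr 1
  rw [ofListFilter]
  simp only [PySem.Set.discard]
  exact List.filter_congr (fun y _ => by by_cases h : y = c <;> simp [h])

theorem altGo_eq_outOf : ∀ (n : Nat) (l : List Char), l.length ≤ n → solveAltGo l = outOf l := by
  intro n
  induction n with
  | zero =>
    intro l hl
    have : l = [] := List.length_eq_zero_iff.mp (Nat.le_zero.mp hl)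
    subst this
    rw [solveAltGo_nil]
    simp [outOf, PySem.Set.ofList_nil]
  | succ n ih =>
    intro l hl
    cases l with
    | nil =>
      rw [solveAltGo_nil]
      simp [outOf, PySem.Set.ofList_nil]
    | cons c t =>
      have hrest : (c :: t).filter (fun x => decide (x ≠ c)) = t.filter (fun x => decide (x ≠ c)) :=
        List.filter_cons_of_neg (by simp)
      have hlen : (t.filter (fun x => decide (x ≠ c))).length ≤ n := by
        have := List.length_filter_le (fun x => decide (x ≠ c)) t
        simp only [List.length_cons] at hl
        omega
      rw [solveAltGo_cons, hrest, ih _ hlen]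
      have hcount : ((c :: t).count c : Int)
          = ((c :: t).length : Int) - ((t.filter (fun x => decide (x ≠ c))).length : Int) := by
        have h1 := lenSplit c t
        rw [List.count_cons_self, List.length_cons]
        push_cast
        omega
      unfold outOf
      rw [ofList_cons_filter, List.map_cons, List.foldl_cons]
      have hcnt : ∀ k ∈ PySem.Set.ofList (t.filter (fun x => decide (x ≠ c))),
          (fun k => (k, ((c :: t).count k : Int))) k
            = (fun k => (k, ((t.filter (fun x => decide (x ≠ c))).count k : Int))) k := by
        intro k hk
        have hkmem : k ∈ t.filter (fun x => decide (x ≠ c)) := (PySem.Set.mem_ofList _ _).mp hk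
        have hkne : k ≠ c := by
          have := List.of_mem_filter hkmem
          simpa using this
        have hc : (t.filter (fun x => decide (x ≠ c))).count k = t.count k := by
          rw [List.count_filter (by simp [hkne])]
        have hbeq : (c == k) = false := by simp [Ne.symm hkne]
        show (k, ((c :: t).count k : Int)) = (k, ((t.filter (fun x => decide (x ≠ c))).count k : Int))
        rw [hc, List.count_cons, hbeq]
        simp
      rw [List.map_congr_left hcnt, hcount]
      conv_rhs => rw [foldl_emit_init]
      simp only [emitStep, String.empty_append, String.append_assoc]

-- ===== VERDICT (by name: the statement is the Claim_ definition above) =====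
theorem solve_spec : Claim_equal_solve := by
  intro A _
  unfold Spec_solve solve_alt
  rw [solve_eq_outOf, altGo_eq_outOf A.toList.length A.toList le_rfl]
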